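-- pv_equiv track=rewrite | github.com/BoisAuLit/leetcode-practice | 1351 - Counter Negative In Sorted Matrix.py | lastPositiveIndex
-- ===== SOURCE A (Python) =====
-- from typing import List
--
-- def lastPositiveIndex(array: List[int]) -> int:
--     if array[-1] >= 0:
--         return len(array) - 1
--     if array[0] < 0:
--         return -1
--     left = 0
--     right = len(array) - 1
--     while left < right:
--         mid = (left + right) // 2
--         if left == mid:
--             return left
--         if array[mid] >= 0:
--             left = mid
--         else:
--             right = mid
-- ===== SOURCE B (Python) =====
-- from typing import List
--
-- def lastPositiveIndex(array: List[int]) -> int: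
--     n = len(array)
--     if array[n - 1] >= 0:
--         return n - 1
--     if array[0] < 0:
--         return -1
--
--     def search(left: int, size: int) -> int:
--         # invariant: array[left] >= 0 > array[left + size]
--         half = size // 2
--         if half == 0:
--             return left
--         if array[left + half] >= 0:
--             return search(left + half, size - half)
--         return search(left, half)
--
--     return search(0, n - 1)
-- ===== Notes on version B (the rewrite author's own statement) =====
-- stated objective: alternative
-- what changed: The iterative while-loop bisection over a (left,right) pair is replaced by a recursive descent over a (left,size) state whose half-width drives both the step and the stop condition; the two boundary guards read array[n-1]/array[0] directly instead of array[-1].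
import Mathlib
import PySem

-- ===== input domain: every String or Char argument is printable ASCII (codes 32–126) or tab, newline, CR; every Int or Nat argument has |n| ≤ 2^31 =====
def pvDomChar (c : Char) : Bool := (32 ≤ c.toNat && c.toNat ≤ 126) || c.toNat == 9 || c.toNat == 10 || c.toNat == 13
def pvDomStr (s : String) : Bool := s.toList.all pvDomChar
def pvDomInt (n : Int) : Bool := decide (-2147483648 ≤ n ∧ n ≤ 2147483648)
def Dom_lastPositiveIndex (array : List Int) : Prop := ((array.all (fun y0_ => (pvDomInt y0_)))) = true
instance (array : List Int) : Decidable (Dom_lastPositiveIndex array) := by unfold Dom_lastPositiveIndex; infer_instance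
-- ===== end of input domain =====

-- B replaces the iterative (left,right) while-loop bisection by a recursive (left,size) descent;
-- same results, same O(log n) cost (objective: alternative).

-- ===== PORT A =====
-- the while loop; fuel bounds the iteration count (each step strictly shrinks right-left,
-- so fuel = array.length is always enough under Pre_; the 0 fallbacks are unreachable there:
-- fuel exhaustion, index out of range, and the while-loop fall-through (Python's None)).
def lastPositiveIndexLoop (array : List Int) : Nat → Int → Int → Int
  | 0, _, _ => 0
  | fuel + 1, left, right =>
    if left < right then
      let mid := PySem.Int.floordiv (left + right) 2
      if left = mid then left
      else if (PySem.List.pyGet? array mid).getD 0 ≥ 0 then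
        lastPositiveIndexLoop array fuel mid right
      else
        lastPositiveIndexLoop array fuel left mid
    else 0

def lastPositiveIndex (array : List Int) : Int :=
  match PySem.List.pyGet? array (-1) with
  | none => 0  -- IndexError on empty input; excluded by Pre_
  | some last =>
    if last ≥ 0 then (array.length : Int) - 1
    else
      match PySem.List.pyGet? array 0 with
      | none => 0  -- unreachable: array is nonempty here
      | some first =>
        if first < 0 then -1
        else lastPositiveIndexLoop array array.length 0 ((array.length : Int) - 1)

-- ===== PORT B =====
-- recursive search over (left, size); size is a nonnegative Python int, carried as Nat,
-- so Python's size // 2 is Nat division. The .getD 0 fallback is unreachable (index in range).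
def lastPositiveIndexSearch (array : List Int) (left : Int) (size : Nat) : Int :=
  let half := size / 2
  if _h : half = 0 then left
  else if (PySem.List.pyGet? array (left + (half : Int))).getD 0 ≥ 0 then
    lastPositiveIndexSearch array (left + (half : Int)) (size - half)
  else
    lastPositiveIndexSearch array left half
  termination_by size
  decreasing_by all_goals omega

def lastPositiveIndex_alt (array : List Int) : Int :=
  let n := array.length
  match PySem.List.pyGet? array ((n : Int) - 1) with
  | none => 0  -- IndexError on empty input; excluded by Pre_
  | some last =>
    if last ≥ 0 then (n : Int) - 1
    else
      match PySem.List.pyGet? array 0 with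
      | none => 0  -- unreachable: array is nonempty here
      | some first =>
        if first < 0 then -1
        else lastPositiveIndexSearch array 0 (n - 1)

-- ===== PRECONDITION & SPEC =====
-- Pre_ excludes only the empty list, on which Python A raises IndexError (array[-1]).
def Pre_lastPositiveIndex (array : List Int) : Prop := array ≠ []
instance (array : List Int) : Decidable (Pre_lastPositiveIndex array) := by
  unfold Pre_lastPositiveIndex; infer_instance

def pvWitness_lastPositiveIndex : List Int := [3, 1, -2, -5]

def Spec_lastPositiveIndex (array : List Int) (out : Int) : Prop := out = lastPositiveIndex_alt array
instance (array : List Int) (out : Int) : Decidable (Spec_lastPositiveIndex array out) := by unfold Spec_lastPositiveIndex; infer_instance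

-- ===== CLAIM (what is proved, stated in full; the proofs are below) =====
def Claim_equal_lastPositiveIndex : Prop := ∀ (array : List Int), Dom_lastPositiveIndex array → Pre_lastPositiveIndex array → Spec_lastPositiveIndex array (lastPositiveIndex array)

-- ===== LEMMAS AND PROOFS =====

-- the loop of A and the recursion of B compute the same index on any interval 0 ≤ l < r
lemma loop_eq_search (array : List Int) :
    ∀ (fuel : Nat) (l r : Int), 0 ≤ l → l < r → (r - l).toNat ≤ fuel →
      lastPositiveIndexLoop array fuel l r = lastPositiveIndexSearch array l (r - l).toNat := by
  intro fuel
  induction fuel with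
  | zero => intro l r hl hlr hfuel; omega
  | succ fuel ih =>
    intro l r hl hlr hfuel
    have hmid : PySem.Int.floordiv (l + r) 2 = l + (((r - l).toNat / 2 : Nat) : Int) := by
      rw [PySem.Int.floordiv_eq_ediv_of_pos (by omega)]; omega
    rw [lastPositiveIndexLoop, lastPositiveIndexSearch]
    simp only [if_pos hlr, hmid]
    by_cases h0 : (r - l).toNat / 2 = 0
    · simp [h0]
    · have h2 : 2 ≤ (r - l).toNat := by omega
      rw [if_neg (by omega), dif_neg h0]
      split
      · rw [ih (l + (((r - l).toNat / 2 : Nat) : Int)) r (by omega) (by omega) (by omega)]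
        congr 1; omega
      · rw [ih l (l + (((r - l).toNat / 2 : Nat) : Int)) hl (by omega) (by omega)]
        congr 1; omega

-- ===== VERDICT (by name: the statement is the Claim_ definition above) =====
theorem lastPositiveIndex_spec : Claim_equal_lastPositiveIndex := by
  intro array _ hne
  unfold Spec_lastPositiveIndex
  have hn : 1 ≤ array.length := by
    cases array with
    | nil => exact absurd rfl hne
    | cons a t => simp
  have hcast : (array.length : Int) - 1 = ((array.length - 1 : Nat) : Int) := by omega
  have hidx : PySem.List.pyGet? array (-1) = PySem.List.pyGet? array ((array.length : Int) - 1) := by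
    rw [PySem.List.pyGet?_neg_one, hcast, PySem.List.pyGet?_natCast, List.getLast?_eq_getElem?]
  simp only [lastPositiveIndex, lastPositiveIndex_alt, hidx]
  cases hget : PySem.List.pyGet? array ((array.length : Int) - 1) with
  | none => rfl
  | some last =>
    by_cases hlast : last ≥ 0
    · simp [hlast]
    · simp only [if_neg hlast]
      cases hget0 : PySem.List.pyGet? array 0 with
      | none => rfl
      | some first =>
        by_cases hfirst : first < 0
        · simp [hfirst]
        · simp only [if_neg hfirst]
          -- here the first and last elements have different signs, so the length is ≥ 2
          have hn2 : 2 ≤ array.length := by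
            by_contra hc
            have h1 : array.length = 1 := by omega
            have heq : PySem.List.pyGet? array ((array.length : Int) - 1) = PySem.List.pyGet? array 0 := by
              rw [h1]; norm_num
            rw [heq, hget0] at hget
            cases hget
            omega
          rw [loop_eq_search array array.length 0 ((array.length : Int) - 1) (by omega) (by omega) (by omega)]
          congr 1
          omega
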